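-- pv_equiv track=rewrite | github.com/Prashantvik/Practice | make_array_zero_2357.py | minimumOperations_map
-- ===== SOURCE A (Python) =====
-- def minimumOperations_map(nums: list[int]) -> int:
--     seen = {}
--     count = 0
--
--     for num in nums:
--         if num != 0:
--             if num in seen.keys():
--                 pass
--             else:
--                 seen[num] = True
--                 count += 1
--
--     return count
-- ===== SOURCE B (Python) =====
-- def minimumOperations_map(nums: list[int]) -> int:
--     s = sorted(x for x in nums if x != 0)
--     if not s:
--         return 0
--     count = 1
--     prev = s[0]
--     for x in s[1:]:
--         if x != prev:
--             count += 1
--         prev = x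
--     return count
-- ===== Notes on version B (the rewrite author's own statement) =====
-- stated objective: alternative
-- what changed: Replaces the dict-of-seen-keys accumulation with sorting the non-zero elements and counting adjacent distinct runs in one pass over the sorted list.
import Mathlib
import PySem

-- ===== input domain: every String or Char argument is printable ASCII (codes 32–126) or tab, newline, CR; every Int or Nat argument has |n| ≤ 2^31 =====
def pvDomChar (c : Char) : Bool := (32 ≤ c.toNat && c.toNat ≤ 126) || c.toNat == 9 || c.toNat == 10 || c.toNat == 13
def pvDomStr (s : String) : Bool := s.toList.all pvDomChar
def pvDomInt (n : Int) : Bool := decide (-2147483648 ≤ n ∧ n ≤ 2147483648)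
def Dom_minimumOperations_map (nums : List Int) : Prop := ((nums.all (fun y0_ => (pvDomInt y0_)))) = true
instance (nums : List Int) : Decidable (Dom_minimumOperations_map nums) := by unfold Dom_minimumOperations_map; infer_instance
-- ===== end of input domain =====

-- B counts distinct non-zero values by sorting them and counting adjacent-distinct runs,
-- instead of A's dict of seen keys; equivalent on every input (alternative decomposition, not claimed faster).

-- ===== PORT A =====
-- for num in nums: if num != 0: if num in seen.keys(): pass else: seen[num] = True; count += 1
def minimumOperations_map (nums : List Int) : Int :=
  (nums.foldl (fun (st : PySem.Dict Int Bool × Int) num =>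
    if num ≠ 0 then
      if st.1.contains num then st
      else (st.1.insert num true, st.2 + 1)
    else st) (PySem.Dict.empty, 0)).2

-- ===== PORT B =====
-- the loop 'for x in s[1:]: if x != prev: count += 1; prev = x'
def pvRunLoop (prev count : Int) : List Int → Int
  | [] => count
  | x :: rest => pvRunLoop x (if x ≠ prev then count + 1 else count) rest

def minimumOperations_map_alt (nums : List Int) : Int :=
  let s := PySem.List.sorted (nums.filter (fun x => decide (x ≠ 0))) (fun x => x) false
  match s with
  | [] => 0
  | h :: t => pvRunLoop h 1 t

-- ===== PRECONDITION & SPEC =====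
def Spec_minimumOperations_map (nums : List Int) (out : Int) : Prop := out = minimumOperations_map_alt nums
instance (nums : List Int) (out : Int) : Decidable (Spec_minimumOperations_map nums out) := by unfold Spec_minimumOperations_map; infer_instance

-- ===== CLAIM (what is proved, stated in full; the proofs are below) =====
def Claim_equal_minimumOperations_map : Prop := ∀ (nums : List Int), Dom_minimumOperations_map nums → Spec_minimumOperations_map nums (minimumOperations_map nums)

-- ===== LEMMAS AND PROOFS =====

-- (insert x F) with x removed first: the card of an insert in general
lemma pv_card_insert (x : Int) (T : Finset Int) :
    (insert x T).card = 1 + (T.erase x).card := by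
  have h : insert x T = insert x (T.erase x) := by
    ext y; simp [Finset.mem_insert, Finset.mem_erase]; tauto
  rw [h, Finset.card_insert_of_notMem (Finset.notMem_erase x T), Nat.add_comm]

-- A's fold: final count = initial count + |distinct non-zeros of l not already keys of d|
lemma pv_foldA (l : List Int) (d : PySem.Dict Int Bool) (c : Int) :
    (l.foldl (fun (st : PySem.Dict Int Bool × Int) num =>
      if num ≠ 0 then
        if st.1.contains num then st
        else (st.1.insert num true, st.2 + 1)
      else st) (d, c)).2
    = c + (((l.filter (fun x => decide (x ≠ 0))).toFinset) \ d.keys.toFinset).card := by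
  induction l generalizing d c with
  | nil => simp
  | cons x l ih =>
    by_cases hx : x = 0
    · subst hx
      simp only [List.foldl_cons, if_neg (by simp : ¬((0:Int) ≠ 0))]
      rw [ih d c, List.filter_cons_of_neg (by simp)]
    · have hfilter : (x :: l).filter (fun y => decide (y ≠ 0))
          = x :: l.filter (fun y => decide (y ≠ 0)) :=
        List.filter_cons_of_pos (by simpa using hx)
      by_cases hc : d.contains x = true
      · have hxk : x ∈ d.keys := (PySem.Dict.contains_iff_mem_keys d x).mp hc
        have hset : insert x ((l.filter (fun y => decide (y ≠ 0))).toFinset) \ d.keys.toFinset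
            = (l.filter (fun y => decide (y ≠ 0))).toFinset \ d.keys.toFinset := by
          ext y
          simp only [Finset.mem_sdiff, Finset.mem_insert, List.mem_toFinset]
          constructor
          · rintro ⟨h1 | h1, h2⟩
            · exact absurd (h1 ▸ hxk) (by simpa using h2)
            · exact ⟨h1, h2⟩
          · rintro ⟨h1, h2⟩; exact ⟨Or.inr h1, h2⟩
        simp only [List.foldl_cons, if_pos hx, if_pos hc]
        rw [ih d c, hfilter, List.toFinset_cons, hset]
      · have hcf : d.contains x = false := by simpa using hc
        have hxk : x ∉ d.keys := fun h => hc ((PySem.Dict.contains_iff_mem_keys d x).mpr h)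
        have hkeys : (d.insert x true).keys = d.keys ++ [x] :=
          PySem.Dict.keys_insert_of_not_contains d true hcf
        have hK : (d.insert x true).keys.toFinset = insert x d.keys.toFinset := by
          rw [hkeys]; ext y; simp
        have hcard :
            (insert x ((l.filter (fun y => decide (y ≠ 0))).toFinset) \ d.keys.toFinset).card
            = 1 + (((l.filter (fun y => decide (y ≠ 0))).toFinset) \ insert x d.keys.toFinset).card := by
          have h1 : insert x ((l.filter (fun y => decide (y ≠ 0))).toFinset) \ d.keys.toFinset
              = insert x (((l.filter (fun y => decide (y ≠ 0))).toFinset) \ insert x d.keys.toFinset) := by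
            ext y
            simp only [Finset.mem_sdiff, Finset.mem_insert]
            constructor
            · rintro ⟨h1 | h1, h2⟩
              · exact Or.inl h1
              · by_cases hyx : y = x
                · exact Or.inl hyx
                · exact Or.inr ⟨h1, by tauto⟩
            · rintro (h1 | ⟨h1, h2⟩)
              · refine ⟨Or.inl h1, ?_⟩
                intro hmem'; exact hxk (by simpa [h1] using (List.mem_toFinset.mp hmem'))
              · exact ⟨Or.inr h1, fun h => h2 (Or.inr h)⟩
          rw [h1, Finset.card_insert_of_notMem (by simp)]
          omega
        simp only [List.foldl_cons, if_pos hx, if_neg hc]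
        rw [ih (d.insert x true) (c + 1), hfilter, List.toFinset_cons, hcard, hK]
        push_cast
        ring

-- B's run loop on a sorted list: count = initial count + |values in s other than prev|
lemma pv_runLoop (s : List Int) (prev c : Int)
    (h : (prev :: s).Pairwise (· ≤ ·)) :
    pvRunLoop prev c s = c + ((s.toFinset).erase prev).card := by
  induction s generalizing prev c with
  | nil => simp [pvRunLoop]
  | cons x rest ih =>
    have hps := List.pairwise_cons.mp h
    have hprevx : prev ≤ x := hps.1 x (by simp)
    have htail : (x :: rest).Pairwise (· ≤ ·) := hps.2
    by_cases hxe : x = prev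
    · subst hxe
      have : ((x :: rest).toFinset.erase x) = (rest.toFinset.erase x) := by
        ext y
        simp only [List.toFinset_cons, Finset.mem_erase, Finset.mem_insert, List.mem_toFinset]
        tauto
      rw [this, ← ih x c htail]
      simp [pvRunLoop]
    · have hlt : prev < x := lt_of_le_of_ne hprevx (fun e => hxe e.symm)
      have hrest : ∀ y ∈ rest, x ≤ y := (List.pairwise_cons.mp htail).1
      have hpnot : prev ∉ (x :: rest).toFinset := by
        simp only [List.toFinset_cons, Finset.mem_insert, List.mem_toFinset]
        rintro (h1 | h1)
        · exact absurd h1.symm hxe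
        · exact absurd (hrest prev h1) (not_le.mpr hlt)
      have herase : ((x :: rest).toFinset).erase prev = (x :: rest).toFinset :=
        Finset.erase_eq_of_notMem hpnot
      rw [herase]
      have : pvRunLoop prev c (x :: rest) = pvRunLoop x (c + 1) rest := by
        simp [pvRunLoop, hxe]
      rw [this, ih x (c + 1) htail]
      simp only [List.toFinset_cons]
      rw [pv_card_insert]
      push_cast
      ring

-- ===== VERDICT (by name: the statement is the Claim_ definition above) =====
theorem minimumOperations_map_spec : Claim_equal_minimumOperations_map := by
  intro nums _
  unfold Spec_minimumOperations_map minimumOperations_map minimumOperations_map_alt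
  set l := nums.filter (fun x => decide (x ≠ 0)) with hl
  have hA := pv_foldA nums PySem.Dict.empty 0
  have hperm : (PySem.List.sorted l (fun x => x) false).Perm l := PySem.List.sorted_perm l _ _
  have hfs : (PySem.List.sorted l (fun x => x) false).toFinset = l.toFinset :=
    List.toFinset_eq_of_perm _ _ hperm
  have hpw : (PySem.List.sorted l (fun x => x) false).Pairwise (· ≤ ·) := by
    simpa using PySem.List.sorted_pairwise l (fun x => x)
  rw [hA]
  simp only [PySem.Dict.keys_empty, List.toFinset_nil, Finset.sdiff_empty, zero_add, ← hl]
  cases hs : PySem.List.sorted l (fun x => x) false with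
  | nil =>
    have : l = [] := List.Perm.eq_nil (hs ▸ hperm).symm
    simp [this]
  | cons h t =>
    have hpw' : (h :: t).Pairwise (· ≤ ·) := hs ▸ hpw
    show (l.toFinset.card : Int) = pvRunLoop h 1 t
    rw [pv_runLoop t h 1 hpw']
    have : l.toFinset = insert h t.toFinset := by
      rw [← hfs, hs]; simp
    rw [this, pv_card_insert]
    push_cast
    ring
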